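-- pv_equiv track=rewrite | github.com/yash752-stack/summarisegit | app/services/analyzer.py | _reverse_reachable
-- ===== SOURCE A (Python) =====
-- from collections import Counter, defaultdict, deque
--
-- def _reverse_reachable(start: str, reverse_graph: dict[str, set[str]]) -> tuple[set[str], int]:
--     seen: set[str] = set()
--     queue: deque[tuple[str, int]] = deque([(start, 0)])
--     max_depth = 0
--     while queue:
--         current, depth = queue.popleft()
--         max_depth = max(max_depth, depth)
--         for neighbor in reverse_graph.get(current, set()):
--             if neighbor in seen:
--                 continue
--             seen.add(neighbor)
--             queue.append((neighbor, depth + 1))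
--     return seen, max_depth
-- ===== SOURCE B (Python) =====
-- def _rr_levels(graph: dict[str, set[str]], frontier: list[str], visited: set[str]) -> list[list[str]]:
--     # stage 1: gather every neighbor of the whole frontier, in order
--     candidates = [nb for node in frontier for nb in graph.get(node, set())]
--     # stage 2: keep the fresh ones, marking them visited
--     level: list[str] = []
--     for nb in candidates:
--         if nb not in visited:
--             visited.add(nb)
--             level.append(nb)
--     if not level:
--         return []
--     return [level] + _rr_levels(graph, level, visited)
--
-- def _reverse_reachable(start: str, reverse_graph: dict[str, set[str]]) -> tuple[set[str], int]:
--     visited: set[str] = set()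
--     levels = _rr_levels(reverse_graph, [start], visited)
--     return visited, len(levels)
-- ===== Notes on version B (the rewrite author's own statement) =====
-- stated objective: alternative
-- what changed: B recursively constructs the explicit list of distance levels (each level built by a staged gather-all-neighbors pass followed by a filter-fresh pass) and reads max_depth off as the length of that list, instead of A's imperative deque of (node, depth) pairs with a running max accumulator.
import Mathlib
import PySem

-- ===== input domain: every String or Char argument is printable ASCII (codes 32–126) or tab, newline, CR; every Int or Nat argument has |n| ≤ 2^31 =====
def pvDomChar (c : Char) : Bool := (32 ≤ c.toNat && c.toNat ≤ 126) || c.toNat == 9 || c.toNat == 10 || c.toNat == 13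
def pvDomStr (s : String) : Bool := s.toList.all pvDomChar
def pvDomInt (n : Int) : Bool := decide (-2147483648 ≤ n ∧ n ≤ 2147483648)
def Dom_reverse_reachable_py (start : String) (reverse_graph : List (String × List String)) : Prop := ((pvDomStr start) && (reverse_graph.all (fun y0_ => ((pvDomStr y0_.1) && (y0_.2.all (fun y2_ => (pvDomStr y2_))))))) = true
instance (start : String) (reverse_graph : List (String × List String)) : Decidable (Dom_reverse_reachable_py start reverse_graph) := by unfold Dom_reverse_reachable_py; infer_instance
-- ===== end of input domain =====

-- B recursively builds the explicit list of BFS levels (gather-then-filter per level) and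
-- returns its length as max_depth; A is a pair-queue BFS with a running max.
-- Objective: alternative decomposition, not speed.

-- ===== PORT A =====

-- reverse_graph.get(current, set()) : first-match association-list lookup
def pvLookup (g : List (String × List String)) (k : String) : List String :=
  (PySem.Dict.mk g).getD k []

-- number of graph-mentioned neighbor strings not yet seen (termination measure only)
def pvUnseen (g : List (String × List String)) (seen : List String) : Nat :=
  ((g.flatMap Prod.snd).toFinset \ seen.toFinset).card

-- the inner 'for neighbor in …' loop of A: updates (seen, queue), appending (n, depth+1)
def pvAstep (seen : PySem.Set String) (q : List (String × Int)) (depth : Int)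
    (ns : List String) : PySem.Set String × List (String × Int) :=
  ns.foldl (fun p n => if n ∈ p.1 then p else (PySem.Set.add p.1 n, p.2 ++ [(n, depth + 1)]))
    (seen, q)

lemma pvLookup_subset (g : List (String × List String)) (k : String) :
    ∀ n ∈ pvLookup g k, n ∈ g.flatMap Prod.snd := by
  induction g with
  | nil =>
    intro n hn
    simp [pvLookup, PySem.Dict.getD_eq_get?_getD,
      show (PySem.Dict.mk ([] : List (String × List String))).get? k = none from rfl] at hn
  | cons p t ih =>
    intro n hn
    rw [pvLookup, PySem.Dict.getD_eq_get?_getD] at hn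
    rw [show (PySem.Dict.mk (p :: t)).get? k = (if p.1 == k then some p.2 else (PySem.Dict.mk t).get? k) from PySem.Dict.get?_mk_cons ..] at hn
    by_cases h : p.1 == k
    · simp [h] at hn
      exact List.mem_flatMap.mpr ⟨p, List.mem_cons_self, hn⟩
    · simp [h] at hn
      have := ih n (by rw [pvLookup, PySem.Dict.getD_eq_get?_getD]; exact hn)
      simp [List.mem_flatMap] at this ⊢
      rcases this with ⟨a, b, hb, hn'⟩
      exact Or.inr ⟨a, b, hb, hn'⟩

lemma pvUnseen_add (g : List (String × List String)) (seen : List String) (n : String)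
    (hU : n ∈ g.flatMap Prod.snd) (h : n ∉ seen) :
    pvUnseen g (PySem.Set.add seen n) + 1 ≤ pvUnseen g seen := by
  have hadd : PySem.Set.add seen n = seen ++ [n] := PySem.Set.add_of_not_mem h
  have hins : (seen ++ [n]).toFinset = insert n seen.toFinset := by
    simp [List.toFinset_append]
  have hmem : n ∈ (g.flatMap Prod.snd).toFinset \ seen.toFinset := by
    simp [Finset.mem_sdiff, hU, h]
  have hsd : (g.flatMap Prod.snd).toFinset \ (insert n seen.toFinset)
        = ((g.flatMap Prod.snd).toFinset \ seen.toFinset).erase n := by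
    ext x; simp [Finset.mem_sdiff, Finset.mem_erase]; tauto
  have hpos : 0 < ((g.flatMap Prod.snd).toFinset \ seen.toFinset).card :=
    Finset.card_pos.mpr ⟨n, hmem⟩
  rw [pvUnseen, hadd, hins, hsd, Finset.card_erase_of_mem hmem]
  unfold pvUnseen; omega

lemma pvAstep_measure (g : List (String × List String)) (ns : List String) :
    ∀ seen q depth, (∀ n ∈ ns, n ∈ g.flatMap Prod.snd) →
      2 * pvUnseen g (pvAstep seen q depth ns).1 + (pvAstep seen q depth ns).2.length
        ≤ 2 * pvUnseen g seen + q.length := by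
  induction ns with
  | nil => intro seen q depth _; simp [pvAstep]
  | cons n t ih =>
    intro seen q depth hsub
    by_cases h : n ∈ seen
    · simpa [pvAstep, h, List.foldl_cons] using
        ih seen q depth (fun m hm => hsub m (List.mem_cons_of_mem _ hm))
    · have hcard := pvUnseen_add g seen n (hsub n List.mem_cons_self) h
      have hstep : pvAstep seen q depth (n :: t)
          = pvAstep (PySem.Set.add seen n) (q ++ [(n, depth + 1)]) depth t := by
        simp [pvAstep, h, List.foldl_cons]
      rw [hstep]
      have := ih (PySem.Set.add seen n) (q ++ [(n, depth + 1)]) depth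
        (fun m hm => hsub m (List.mem_cons_of_mem _ hm))
      simp only [List.length_append, List.length_cons, List.length_nil] at this ⊢
      omega

-- the 'while queue' loop of A
def pvAloop (g : List (String × List String)) (seen : PySem.Set String)
    (queue : List (String × Int)) (md : Int) : List String × Int :=
  match queue with
  | [] => (seen, md)
  | (current, depth) :: rest =>
    let md' := max md depth
    let p := pvAstep seen rest depth (pvLookup g current)
    pvAloop g p.1 p.2 md'
termination_by 2 * pvUnseen g seen + queue.length
decreasing_by
  have := pvAstep_measure g (pvLookup g current) seen rest depth (pvLookup_subset g current)
  simp only [List.length_cons]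
  omega

def reverse_reachable_py (start : String) (reverse_graph : List (String × List String)) :
    List String × Int :=
  pvAloop reverse_graph PySem.Set.empty [(start, 0)] 0

-- ===== PORT B =====

-- 'candidates = [nb for node in frontier for nb in graph.get(node, set())]'
def pvGather (g : List (String × List String)) (frontier : List String) : List String :=
  frontier.flatMap (pvLookup g)

-- 'if nb not in visited: visited.add(nb); level.append(nb)'
def pvMark (q : PySem.Set String × List String) (n : String) : PySem.Set String × List String :=
  if n ∈ q.1 then q else (PySem.Set.add q.1 n, q.2 ++ [n])

-- the 'for nb in candidates' filter loop: returns (visited', level)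
def pvFilterFresh (candidates : List String) (visited : PySem.Set String) :
    PySem.Set String × List String :=
  candidates.foldl pvMark (visited, [])

lemma pvGather_subset (g : List (String × List String)) (frontier : List String) :
    ∀ n ∈ pvGather g frontier, n ∈ g.flatMap Prod.snd := by
  intro n hn
  rcases List.mem_flatMap.mp hn with ⟨c, _, hc⟩
  exact pvLookup_subset g c n hc

lemma pvMark_measure (g : List (String × List String)) (ns : List String) :
    ∀ (seen : PySem.Set String) (acc : List String), (∀ n ∈ ns, n ∈ g.flatMap Prod.snd) →
      pvUnseen g (ns.foldl pvMark (seen, acc)).1 + (ns.foldl pvMark (seen, acc)).2.length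
        ≤ pvUnseen g seen + acc.length := by
  induction ns with
  | nil => intro seen acc _; simp
  | cons n t ih =>
    intro seen acc hsub
    by_cases h : n ∈ seen
    · simpa [pvMark, h, List.foldl_cons] using
        ih seen acc (fun m hm => hsub m (List.mem_cons_of_mem _ hm))
    · have hcard := pvUnseen_add g seen n (hsub n List.mem_cons_self) h
      have hstep : (n :: t).foldl pvMark (seen, acc)
          = t.foldl pvMark (PySem.Set.add seen n, acc ++ [n]) := by
        simp [pvMark, h, List.foldl_cons]
      rw [hstep]
      have := ih (PySem.Set.add seen n) (acc ++ [n])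
        (fun m hm => hsub m (List.mem_cons_of_mem _ hm))
      simp only [List.length_append, List.length_cons, List.length_nil] at this ⊢
      omega

-- the recursive '_rr_levels': returns (list of levels, final visited)
def pvLevels (g : List (String × List String)) (frontier : List String)
    (visited : PySem.Set String) : List (List String) × PySem.Set String :=
  if h : (pvFilterFresh (pvGather g frontier) visited).2 = [] then
    ([], (pvFilterFresh (pvGather g frontier) visited).1)
  else
    ((pvFilterFresh (pvGather g frontier) visited).2 ::
       (pvLevels g (pvFilterFresh (pvGather g frontier) visited).2
         (pvFilterFresh (pvGather g frontier) visited).1).1,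
     (pvLevels g (pvFilterFresh (pvGather g frontier) visited).2
       (pvFilterFresh (pvGather g frontier) visited).1).2)
termination_by pvUnseen g visited
decreasing_by
  all_goals
    have hm := pvMark_measure g (pvGather g frontier) visited [] (pvGather_subset g frontier)
    have hne : 1 ≤ (pvFilterFresh (pvGather g frontier) visited).2.length :=
      List.length_pos_iff.mpr h
    simp only [pvFilterFresh, List.length_nil] at hm hne ⊢
    omega

def reverse_reachable_py_alt (start : String) (reverse_graph : List (String × List String)) :
    List String × Int :=
  ((pvLevels reverse_graph [start] PySem.Set.empty).2,
   ((pvLevels reverse_graph [start] PySem.Set.empty).1.length : Int))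

-- ===== PRECONDITION & SPEC =====
def Spec_reverse_reachable_py (start : String) (reverse_graph : List (String × List String)) (out : List String × Int) : Prop := out = reverse_reachable_py_alt start reverse_graph
instance (start : String) (reverse_graph : List (String × List String)) (out : List String × Int) : Decidable (Spec_reverse_reachable_py start reverse_graph out) := by unfold Spec_reverse_reachable_py; infer_instance

-- ===== CLAIM (what is proved, stated in full; the proofs are below) =====
def Claim_equal_reverse_reachable_py : Prop := ∀ (start : String) (reverse_graph : List (String × List String)), Dom_reverse_reachable_py start reverse_graph → Spec_reverse_reachable_py start reverse_graph (reverse_reachable_py start reverse_graph)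

-- ===== LEMMAS AND PROOFS =====

-- proof-only helper: A's processing of one frontier node, as one fold step
def pvBinner (g : List (String × List String)) (p : PySem.Set String × List String)
    (node : String) : PySem.Set String × List String :=
  (pvLookup g node).foldl pvMark p

lemma pvAloop_nil (g : List (String × List String)) (seen : PySem.Set String) (md : Int) :
    pvAloop g seen [] md = (seen, md) := by
  rw [pvAloop]

lemma pvAloop_cons (g : List (String × List String)) (seen : PySem.Set String)
    (c : String) (d : Int) (rest : List (String × Int)) (md : Int) :
    pvAloop g seen ((c, d) :: rest) md
      = pvAloop g (pvAstep seen rest d (pvLookup g c)).1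
          (pvAstep seen rest d (pvLookup g c)).2 (max md d) := by
  rw [pvAloop]

lemma pvLevels_stop (g : List (String × List String)) (frontier : List String)
    (visited : PySem.Set String) (h : (pvFilterFresh (pvGather g frontier) visited).2 = []) :
    pvLevels g frontier visited = ([], (pvFilterFresh (pvGather g frontier) visited).1) := by
  rw [pvLevels, dif_pos h]

lemma pvLevels_go (g : List (String × List String)) (frontier : List String)
    (visited : PySem.Set String) (h : (pvFilterFresh (pvGather g frontier) visited).2 ≠ []) :
    pvLevels g frontier visited
      = ((pvFilterFresh (pvGather g frontier) visited).2 ::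
           (pvLevels g (pvFilterFresh (pvGather g frontier) visited).2
             (pvFilterFresh (pvGather g frontier) visited).1).1,
         (pvLevels g (pvFilterFresh (pvGather g frontier) visited).2
           (pvFilterFresh (pvGather g frontier) visited).1).2) := by
  rw [pvLevels, dif_neg h]

-- A's inner fold only ever appends to the queue: shift the queue accumulator out
lemma pvAstep_shift (ns : List String) :
    ∀ seen q depth, pvAstep seen q depth ns
      = ((pvAstep seen [] depth ns).1, q ++ (pvAstep seen [] depth ns).2) := by
  induction ns with
  | nil => intro seen q depth; simp [pvAstep]
  | cons n t ih =>
    intro seen q depth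
    by_cases h : n ∈ seen
    · simp only [pvAstep, List.foldl_cons, if_pos h]
      exact ih seen q depth
    · simp only [pvAstep, List.foldl_cons, if_neg h]
      rw [show (t.foldl (fun p n => if n ∈ p.1 then p else (PySem.Set.add p.1 n, p.2 ++ [(n, depth + 1)])) (PySem.Set.add seen n, q ++ [(n, depth + 1)])) = pvAstep (PySem.Set.add seen n) (q ++ [(n, depth + 1)]) depth t from rfl]
      rw [show (t.foldl (fun p n => if n ∈ p.1 then p else (PySem.Set.add p.1 n, p.2 ++ [(n, depth + 1)])) (PySem.Set.add seen n, [] ++ [(n, depth + 1)])) = pvAstep (PySem.Set.add seen n) ([] ++ [(n, depth + 1)]) depth t from rfl]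
      rw [ih (PySem.Set.add seen n) (q ++ [(n, depth + 1)]) depth,
          ih (PySem.Set.add seen n) ([] ++ [(n, depth + 1)]) depth]
      simp

-- same for B's inner fold
lemma pvMark_shift (ns : List String) :
    ∀ (seen : PySem.Set String) (acc : List String),
      ns.foldl pvMark (seen, acc)
      = ((ns.foldl pvMark (seen, [])).1, acc ++ (ns.foldl pvMark (seen, [])).2) := by
  induction ns with
  | nil => intro seen acc; simp
  | cons n t ih =>
    intro seen acc
    by_cases h : n ∈ seen
    · simp only [List.foldl_cons, pvMark, if_pos h]
      exact ih seen acc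
    · simp only [List.foldl_cons, pvMark, if_neg h]
      rw [ih (PySem.Set.add seen n) (acc ++ [n]), ih (PySem.Set.add seen n) ([] ++ [n])]
      simp

-- A's inner fold is B's inner fold with every new node tagged with depth+1
lemma pvAstep_eq_pvMark (ns : List String) :
    ∀ seen depth, pvAstep seen [] depth ns
      = ((ns.foldl pvMark (seen, [])).1,
         (ns.foldl pvMark (seen, [])).2.map (fun n => (n, depth + 1))) := by
  induction ns with
  | nil => intro seen depth; simp [pvAstep]
  | cons n t ih =>
    intro seen depth
    by_cases h : n ∈ seen
    · simp only [pvAstep, List.foldl_cons, pvMark, if_pos h] at *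
      exact ih seen depth
    · simp only [pvAstep, List.foldl_cons, pvMark, if_neg h]
      rw [show (t.foldl (fun p n => if n ∈ p.1 then p else (PySem.Set.add p.1 n, p.2 ++ [(n, depth + 1)])) (PySem.Set.add seen n, [] ++ [(n, depth + 1)])) = pvAstep (PySem.Set.add seen n) ([] ++ [(n, depth + 1)]) depth t from rfl]
      rw [pvAstep_shift t (PySem.Set.add seen n) ([] ++ [(n, depth + 1)]) depth]
      rw [ih (PySem.Set.add seen n) depth]
      rw [pvMark_shift t (PySem.Set.add seen n) ([] ++ [n])]
      simp

-- a constant running max over a list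
lemma foldl_max_absorb (d : Int) : ∀ (l : List String) (md : Int),
    l.foldl (fun m _ => max m d) (max md d) = max md d := by
  intro l
  induction l with
  | nil => intro md; simp
  | cons c t ih =>
    intro md
    simp only [List.foldl_cons, max_assoc, max_self]
    exact ih md

-- A's pair queue always consists of the rest of the current level (depth d) followed by the
-- next level (depth d+1); processing it is a fold of pvBinner over the level
lemma pvAloop_interleave (g : List (String × List String)) (d : Int) :
    ∀ (l1 l2 : List String) (seen : PySem.Set String) (md : Int),
      pvAloop g seen (l1.map (fun n => (n, d)) ++ l2.map (fun n => (n, d + 1))) md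
      = pvAloop g (l1.foldl (pvBinner g) (seen, l2)).1
          ((l1.foldl (pvBinner g) (seen, l2)).2.map (fun n => (n, d + 1)))
          (l1.foldl (fun m _ => max m d) md) := by
  intro l1
  induction l1 with
  | nil => intro l2 seen md; simp only [List.map_nil, List.nil_append, List.foldl_nil]
  | cons c t ih =>
    intro l2 seen md
    rw [List.map_cons, List.cons_append, pvAloop_cons]
    rw [pvAstep_shift (pvLookup g c) seen (t.map (fun n => (n, d)) ++ l2.map (fun n => (n, d + 1))) d]
    rw [pvAstep_eq_pvMark (pvLookup g c) seen d]
    have hb : pvBinner g (seen, l2) c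
        = (((pvLookup g c).foldl pvMark (seen, [])).1,
           l2 ++ ((pvLookup g c).foldl pvMark (seen, [])).2) := by
      rw [pvBinner, pvMark_shift (pvLookup g c) seen l2]
    simp only [List.append_assoc, ← List.map_append]
    rw [ih (l2 ++ ((pvLookup g c).foldl pvMark (seen, [])).2) _ (max md d)]
    simp only [List.foldl_cons, hb]

-- folding A's per-node step over a frontier = B's gather-then-filter over the frontier
lemma foldl_binner_eq_gather (g : List (String × List String)) :
    ∀ (frontier : List String) (init : PySem.Set String × List String),
      frontier.foldl (pvBinner g) init = (pvGather g frontier).foldl pvMark init := by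
  intro frontier
  induction frontier with
  | nil => intro init; simp [pvGather]
  | cons c t ih =>
    intro init
    simp only [pvGather, List.flatMap_cons, List.foldl_append, List.foldl_cons]
    rw [ih]
    rfl

-- bridge: on a single-level queue, A's loop returns B's (visited, d + number of levels)
lemma pvAloop_eq_levels (g : List (String × List String)) :
    ∀ (N : Nat) (visited : PySem.Set String) (frontier : List String) (d md : Int),
      pvUnseen g visited + frontier.length ≤ N → md ≤ d → frontier ≠ [] →
      pvAloop g visited (frontier.map (fun n => (n, d))) md
        = ((pvLevels g frontier visited).2,
           d + ((pvLevels g frontier visited).1.length : Int)) := by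
  intro N
  induction N with
  | zero =>
    intro visited frontier d md hN _ hne
    cases frontier with
    | nil => exact absurd rfl hne
    | cons c t => simp [List.length_cons] at hN
  | succ n ih =>
    intro visited frontier d md hN hmd hne
    cases frontier with
    | nil => exact absurd rfl hne
    | cons c t =>
      have hinter := pvAloop_interleave g d (c :: t) [] visited md
      simp only [List.map_nil, List.append_nil] at hinter
      rw [hinter, foldl_binner_eq_gather g (c :: t) (visited, [])]
      have hmax : (c :: t).foldl (fun m _ => max m d) md = d := by
        simp only [List.foldl_cons]
        rw [foldl_max_absorb d t md, max_eq_right hmd]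
      rw [hmax]
      have hP : (pvGather g (c :: t)).foldl pvMark (visited, [])
          = pvFilterFresh (pvGather g (c :: t)) visited := rfl
      rw [hP]
      by_cases h : (pvFilterFresh (pvGather g (c :: t)) visited).2 = []
      · rw [h, pvLevels_stop g (c :: t) visited h]
        simp [pvAloop_nil]
      · have hm := pvMark_measure g (pvGather g (c :: t)) visited []
          (pvGather_subset g (c :: t))
        have hlen : 1 ≤ (pvFilterFresh (pvGather g (c :: t)) visited).2.length :=
          List.length_pos_iff.mpr h
        simp only [List.length_nil] at hm
        have hN' : pvUnseen g (pvFilterFresh (pvGather g (c :: t)) visited).1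
            + (pvFilterFresh (pvGather g (c :: t)) visited).2.length ≤ n := by
          simp only [List.length_cons] at hN
          simp only [pvFilterFresh]
          omega
        rw [ih (pvFilterFresh (pvGather g (c :: t)) visited).1
          (pvFilterFresh (pvGather g (c :: t)) visited).2 (d + 1) d hN' (by omega) h]
        rw [pvLevels_go g (c :: t) visited h]
        simp only [List.length_cons]
        rw [Prod.mk.injEq]
        exact ⟨rfl, by push_cast; ring⟩

-- ===== VERDICT (by name: the statement is the Claim_ definition above) =====
theorem reverse_reachable_py_spec : Claim_equal_reverse_reachable_py := by
  intro start g _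
  unfold Spec_reverse_reachable_py reverse_reachable_py reverse_reachable_py_alt
  have h := pvAloop_eq_levels g (pvUnseen g PySem.Set.empty + 1) PySem.Set.empty [start] 0 0
    (by simp) (le_refl 0) (by simp)
  simpa using h
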